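-- pv_equiv track=rewrite | github.com/tseng1026/Cryptography-and-Network-Security | Assign3/Problem3.py | check
-- ===== SOURCE A (Python) =====
-- def check(str):
-- 	ret = 1
-- 	for k in range(len(str)):
-- 		if k % 2 == 0 and str[k].isdigit(): continue
-- 		if k % 2 == 1 and str[k] == "-": continue
-- 		ret = 0
-- 		break
-- 	return ret
-- ===== SOURCE B (Python) =====
-- def check(str):
--     rest = str
--     while rest:
--         if not rest[0].isdigit():
--             return 0
--         if len(rest) > 1 and rest[1] != "-":
--             return 0
--         rest = rest[2:]
--     return 1
-- ===== Notes on version B (the rewrite author's own statement) =====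
-- stated objective: simpler
-- what changed: Replaces the indexed loop with parity tests k % 2 and a break flag by a loop that consumes one digit/dash pair of the string at a time, with no index arithmetic or flag.
import Mathlib
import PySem

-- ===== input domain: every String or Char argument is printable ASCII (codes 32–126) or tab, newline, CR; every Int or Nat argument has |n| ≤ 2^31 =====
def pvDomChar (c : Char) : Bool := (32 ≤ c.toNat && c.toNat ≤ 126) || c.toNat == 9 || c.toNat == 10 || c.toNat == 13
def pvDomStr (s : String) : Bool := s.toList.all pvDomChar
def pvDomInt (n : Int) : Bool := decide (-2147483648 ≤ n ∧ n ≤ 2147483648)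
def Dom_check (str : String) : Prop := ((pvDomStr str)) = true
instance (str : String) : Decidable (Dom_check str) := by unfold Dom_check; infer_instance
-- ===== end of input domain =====

-- B is simpler: the indexed loop with parity tests k % 2 and a break flag is replaced by a loop
-- consuming one digit/dash pair at a time, with no index arithmetic or flag.

-- ===== PORT A =====
-- A's loop over k in range(len(str)) with early break, k carried as the index counter.
def checkAux : Nat → List Char → Int
  | _, [] => 1
  | k, c :: rest =>
    if k % 2 == 0 && PySem.Chars.isdigit c then checkAux (k + 1) rest
    else if k % 2 == 1 && c == '-' then checkAux (k + 1) rest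
    else 0

def check (str : String) : Int := checkAux 0 str.toList

-- ===== PORT B =====
-- B's pair loop: rest empty -> 1; rest[0] must be a digit; lone char -> 1; rest[1] must be '-'; continue with rest[2:].
def checkAltAux : List Char → Int
  | [] => 1
  | c :: rest =>
    if !(PySem.Chars.isdigit c) then 0
    else match rest with
      | [] => 1
      | d :: rest' => if d != '-' then 0 else checkAltAux rest'

def check_alt (str : String) : Int := checkAltAux str.toList

-- ===== PRECONDITION & SPEC =====
def Spec_check (str : String) (out : Int) : Prop := out = check_alt str
instance (str : String) (out : Int) : Decidable (Spec_check str out) := by unfold Spec_check; infer_instance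

-- ===== CLAIM (what is proved, stated in full; the proofs are below) =====
def Claim_equal_check : Prop := ∀ (str : String), Dom_check str → Spec_check str (check str)

-- ===== LEMMAS AND PROOFS =====

theorem checkAux_eq_alt : ∀ (n : Nat) (l : List Char) (k : Nat),
    l.length ≤ n → k % 2 = 0 → checkAux k l = checkAltAux l := by
  intro n
  induction n with
  | zero =>
    intro l k hl _
    have : l = [] := List.eq_nil_of_length_eq_zero (Nat.le_zero.mp hl)
    subst this; rfl
  | succ n ih =>
    intro l k hl hk
    match l with
    | [] => rfl
    | [c] =>
      simp [checkAux, checkAltAux, hk]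
      by_cases h : PySem.Chars.isdigit c <;> simp [h]
    | c :: d :: rest =>
      have hk1 : (k + 1) % 2 = 1 := by omega
      have hk2 : (k + 2) % 2 = 0 := by omega
      simp only [checkAux, checkAltAux, hk, hk1]
      by_cases h : PySem.Chars.isdigit c
      · simp only [h, Bool.and_true, Bool.not_true]
        simp only [beq_self_eq_true, Bool.true_and, beq_iff_eq]
        by_cases hd : d = '-'
        · simp only [hd]
          have : checkAux (k + 1 + 1) rest = checkAltAux rest := by
            apply ih rest (k + 2)
            · simp only [List.length_cons] at hl; omega
            · exact hk2
          simpa [bne] using this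
        · simp [hd, bne]
      · simp [h]

-- ===== VERDICT (by name: the statement is the Claim_ definition above) =====
theorem check_spec : Claim_equal_check := by
  intro str _
  unfold Spec_check check check_alt
  exact checkAux_eq_alt str.toList.length str.toList 0 le_rfl rfl
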